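-- pv_equiv track=rewrite | github.com/pypi-data/pypi-mirror-361 | packages/pytwincatparser/pytwincatparser-0.5.0.tar.gz/pytwincatparser-0.5.0/test.py | _extract_multiline_comment
-- ===== SOURCE A (Python) =====
-- from typing import Dict, List, Optional, Tuple, Any
--
-- def _extract_multiline_comment(lines: List[str], start_idx: int, initial_comment: str) -> Tuple[str, int]:
--     """
--     Extract a multi-line comment starting from a specific line.
--
--     Args:
--         lines: List of lines from the VAR block
--         start_idx: Index of the line where the comment starts
--         initial_comment: The initial comment text from the first line
--
--     Returns:
--         A tuple of (comment_text, end_idx) where comment_text is the extracted comment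
--         and end_idx is the index of the last line of the comment
--     """
--     comment_text = initial_comment
--     end_idx = start_idx
--
--     # If the comment starts with (* and doesn't end with *), it's a multi-line comment
--     if '(*' in comment_text and not '*)' in comment_text:
--         # Find the end of the multi-line comment
--         for j in range(start_idx + 1, len(lines)):
--             comment_text += '\n' + lines[j].strip()
--             end_idx = j
--             if '*)' in lines[j]:  # Check for the end of a comment
--                 break
--
--     return comment_text, end_idx
-- ===== SOURCE B (Python) =====
-- def _extract_multiline_comment(lines, start_idx, initial_comment):
--     if '(*' not in initial_comment or '*)' in initial_comment:
--         return initial_comment, start_idx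
--     n = len(lines)
--     if start_idx + 1 >= n:
--         return initial_comment, start_idx
--     # locate the terminator line first; default to the last line if none
--     end = n - 1
--     for j in range(start_idx + 1, n):
--         if '*)' in lines[j]:
--             end = j
--             break
--     text = initial_comment + ''.join('\n' + lines[k].strip() for k in range(start_idx + 1, end + 1))
--     return text, end
-- ===== Notes on version B (the rewrite author's own statement) =====
-- stated objective: alternative
-- what changed: A accumulates text and end index together in one break-on-terminator loop; B first locates the terminator line (defaulting to the last line), then builds the text in a separate join over the now-known range.
import Mathlib
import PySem

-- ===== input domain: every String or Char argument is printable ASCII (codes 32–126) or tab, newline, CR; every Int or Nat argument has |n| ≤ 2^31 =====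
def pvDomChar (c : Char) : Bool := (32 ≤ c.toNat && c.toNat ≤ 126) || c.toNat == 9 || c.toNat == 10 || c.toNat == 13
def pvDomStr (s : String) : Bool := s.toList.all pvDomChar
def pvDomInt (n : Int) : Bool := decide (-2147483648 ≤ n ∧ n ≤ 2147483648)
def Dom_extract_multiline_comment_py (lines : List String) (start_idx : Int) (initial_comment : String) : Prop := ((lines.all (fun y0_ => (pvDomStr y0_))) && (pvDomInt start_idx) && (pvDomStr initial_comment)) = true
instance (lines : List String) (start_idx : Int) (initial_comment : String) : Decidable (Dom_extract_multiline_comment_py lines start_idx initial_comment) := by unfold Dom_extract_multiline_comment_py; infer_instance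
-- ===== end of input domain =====

-- B locates the comment terminator first and then joins the consumed lines in a second pass,
-- instead of A's single loop that accumulates text and end index together (alternative decomposition).


-- ===== PORT A =====
-- A's for-loop with break: comment_text and end_idx carried together, stop at the first line containing "*)"
def pvALoop (lines : List String) : List Int → String → Int → String × Int
  | [], c, e => (c, e)
  | j :: rest, c, _ =>
      let line := PySem.List.pyGetD lines j ""
      let c' := c ++ "\n" ++ PySem.Str.strip line
      if PySem.Str.isIn "*)" line then (c', j) else pvALoop lines rest c' j

def extract_multiline_comment_py (lines : List String) (start_idx : Int) (initial_comment : String) : String × Int :=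
  if PySem.Str.isIn "(*" initial_comment && !(PySem.Str.isIn "*)" initial_comment) then
    pvALoop lines (PySem.List.pyRange (start_idx + 1) (lines.length : Int) 1) initial_comment start_idx
  else
    (initial_comment, start_idx)

-- ===== PORT B =====
-- B's first pass: index of the first line containing "*)", or the default (last line) if none
def pvBFind (lines : List String) : List Int → Int → Int
  | [], dflt => dflt
  | j :: rest, dflt =>
      if PySem.Str.isIn "*)" (PySem.List.pyGetD lines j "") then j else pvBFind lines rest dflt

def extract_multiline_comment_py_alt (lines : List String) (start_idx : Int) (initial_comment : String) : String × Int :=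
  if !(PySem.Str.isIn "(*" initial_comment) || PySem.Str.isIn "*)" initial_comment then
    (initial_comment, start_idx)
  else if (lines.length : Int) ≤ start_idx + 1 then
    (initial_comment, start_idx)
  else
    let n : Int := (lines.length : Int)
    let e := pvBFind lines (PySem.List.pyRange (start_idx + 1) n 1) (n - 1)
    let text := initial_comment ++
      PySem.Str.join "" ((PySem.List.pyRange (start_idx + 1) (e + 1) 1).map
        (fun k => "\n" ++ PySem.Str.strip (PySem.List.pyGetD lines k "")))
    (text, e)

-- ===== PRECONDITION & SPEC =====
-- Pre_ excludes exactly the inputs where the Python A raises IndexError (a multi-line comment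
-- whose scan starts below -len(lines), so lines[j] is out of range); B raises there too.
def Pre_extract_multiline_comment_py (lines : List String) (start_idx : Int) (initial_comment : String) : Prop :=
  (PySem.Str.isIn "(*" initial_comment = true ∧ PySem.Str.isIn "*)" initial_comment = false ∧
   start_idx + 1 < (lines.length : Int)) → -(lines.length : Int) ≤ start_idx + 1
instance (lines : List String) (start_idx : Int) (initial_comment : String) : Decidable (Pre_extract_multiline_comment_py lines start_idx initial_comment) := by unfold Pre_extract_multiline_comment_py; infer_instance

def pvWitness_extract_multiline_comment_py : List String × Int × String := (["body", "end *)"], 0, "(* start")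

def Spec_extract_multiline_comment_py (lines : List String) (start_idx : Int) (initial_comment : String) (out : String × Int) : Prop := out = extract_multiline_comment_py_alt lines start_idx initial_comment
instance (lines : List String) (start_idx : Int) (initial_comment : String) (out : String × Int) : Decidable (Spec_extract_multiline_comment_py lines start_idx initial_comment out) := by unfold Spec_extract_multiline_comment_py; infer_instance

-- ===== CLAIM (what is proved, stated in full; the proofs are below) =====
def Claim_equal_extract_multiline_comment_py : Prop := ∀ (lines : List String) (start_idx : Int) (initial_comment : String), Dom_extract_multiline_comment_py lines start_idx initial_comment → Pre_extract_multiline_comment_py lines start_idx initial_comment → Spec_extract_multiline_comment_py lines start_idx initial_comment (extract_multiline_comment_py lines start_idx initial_comment)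

-- ===== LEMMAS AND PROOFS =====

lemma pvJoin_empty_nil : PySem.Str.join "" [] = "" := rfl

lemma pvJoin_empty_cons (x : String) (xs : List String) :
    PySem.Str.join "" (x :: xs) = x ++ PySem.Str.join "" xs := by
  cases xs with
  | nil => simp [PySem.Str.join, PySem.Chars.join, List.intercalate]
  | cons y ys => simp [PySem.Str.join, PySem.Chars.join_cons_cons]

lemma pvBFind_bound (lines : List String) (js : List Int) (d : Int) :
    pvBFind lines js d = d ∨ pvBFind lines js d ∈ js := by
  induction js with
  | nil => left; rfl
  | cons j rest ih =>
      simp only [pvBFind]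
      split
      · right; exact List.mem_cons_self
      · rcases ih with h1 | h1
        · left; exact h1
        · right; exact List.mem_cons_of_mem _ h1

lemma pvLoop_eq (lines : List String) :
    ∀ (k : Nat) (a : Int) (c : String) (e : Int),
      (((lines.length : Int) - a).toNat = k) → a < (lines.length : Int) →
      pvALoop lines (PySem.List.pyRange a (lines.length : Int) 1) c e =
        (c ++ PySem.Str.join ""
          ((PySem.List.pyRange a (pvBFind lines (PySem.List.pyRange a (lines.length : Int) 1) ((lines.length : Int) - 1) + 1) 1).map
            (fun j => "\n" ++ PySem.Str.strip (PySem.List.pyGetD lines j ""))),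
         pvBFind lines (PySem.List.pyRange a (lines.length : Int) 1) ((lines.length : Int) - 1)) := by
  intro k
  induction k using Nat.strong_induction_on with
  | _ k ih =>
    intro a c e hk ha
    rw [PySem.List.pyRange_one_cons ha]
    simp only [pvALoop, pvBFind]
    split
    case isTrue hterm =>
      rw [PySem.List.pyRange_one_singleton]
      simp [pvJoin_empty_cons, pvJoin_empty_nil, String.append_assoc]
    case isFalse hterm =>
      by_cases hlt : a + 1 < (lines.length : Int)
      · rw [ih (((lines.length : Int) - (a+1)).toNat) (by omega) (a+1)
            (c ++ "\n" ++ PySem.Str.strip (PySem.List.pyGetD lines a "")) a rfl hlt]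
        have hE : a < pvBFind lines (PySem.List.pyRange (a+1) (lines.length : Int) 1) ((lines.length : Int) - 1) + 1 := by
          rcases pvBFind_bound lines (PySem.List.pyRange (a+1) (lines.length : Int) 1) ((lines.length : Int) - 1) with h1 | h1
          · omega
          · rw [PySem.List.mem_pyRange_one] at h1; omega
        rw [PySem.List.pyRange_one_cons hE]
        simp [pvJoin_empty_cons, String.append_assoc]
      · have hn : (lines.length : Int) = a + 1 := by omega
        rw [hn, PySem.List.pyRange_one_eq_nil (le_refl (a+1))]
        simp only [pvALoop, pvBFind]
        have e1 : a + 1 - 1 = a := by ring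
        rw [e1, PySem.List.pyRange_one_singleton]
        simp [pvJoin_empty_cons, pvJoin_empty_nil, String.append_assoc]

-- ===== VERDICT (by name: the statement is the Claim_ definition above) =====
theorem extract_multiline_comment_py_spec : Claim_equal_extract_multiline_comment_py := by
  intro lines start_idx ic _ _
  unfold Spec_extract_multiline_comment_py extract_multiline_comment_py extract_multiline_comment_py_alt
  split_ifs with h1 h2 h3
  · simp_all
  · rw [PySem.List.pyRange_one_eq_nil h3]; rfl
  · rw [pvLoop_eq lines (((lines.length : Int) - (start_idx + 1)).toNat) (start_idx + 1) ic start_idx rfl (by omega)]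
  · rfl
  · simp_all
  · simp_all
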